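-- pv_equiv track=rewrite | github.com/soravux/honglin_gforms_userstudy | eval.py | _detect_answer_columns
-- ===== SOURCE A (Python) =====
-- CHOICE_A = "method a"
--
-- CHOICE_B = "method b"
--
-- def _detect_answer_columns(header: list[str], rows: list[list[str]], n_columns: int) -> list[int]:
--     question_headers = {
--         "which set of poses appears more anatomically plausible and natural for the given human or animal mesh?",
--         "which set of poses is more diverse, with a larger range of different poses? ignore completely unrecognizable poses.",
--     }
--
--     answer_columns: list[int] = []
--     for col_idx in range(n_columns):
--         header_value = ""
--         if col_idx < len(header):
--             header_value = header[col_idx].strip().lower()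
--
--         values = set()
--         for row in rows:
--             if col_idx >= len(row):
--                 continue
--             value = row[col_idx].strip().lower()
--             if value:
--                 values.add(value)
--
--         is_answer_by_header = header_value in question_headers
--         is_answer_by_values = bool(values) and values.issubset({CHOICE_A, CHOICE_B})
--         if is_answer_by_header or is_answer_by_values:
--             answer_columns.append(col_idx)
--
--     if not answer_columns:
--         raise SystemExit("Error: could not find any answer columns with values 'Method A'/'Method B'")
--
--     return answer_columns
-- ===== SOURCE B (Python) =====
-- CHOICE_A = "method a"
--
-- CHOICE_B = "method b"
--
-- QUESTION_HEADERS = {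
--     "which set of poses appears more anatomically plausible and natural for the given human or animal mesh?",
--     "which set of poses is more diverse, with a larger range of different poses? ignore completely unrecognizable poses.",
-- }
--
--
-- def _detect_answer_columns(header: list[str], rows: list[list[str]], n_columns: int) -> list[int]:
--     # Instead of building per-column SETS and testing subset-of-{A,B} per column
--     # (A's approach), keep two boolean flags per column — "saw a non-empty value"
--     # and "saw a value other than the two choices" — filled in one row-major pass.
--     # A column is an answer-by-values column iff has_value and not has_other.
--     has_value = [False] * n_columns
--     has_other = [False] * n_columns
--     for row in rows:
--         for col_idx, raw in enumerate(row[:n_columns]):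
--             value = raw.strip().lower()
--             if value:
--                 has_value[col_idx] = True
--                 if value != CHOICE_A and value != CHOICE_B:
--                     has_other[col_idx] = True
--
--     answer_columns = [
--         col_idx
--         for col_idx in range(n_columns)
--         if (col_idx < len(header) and header[col_idx].strip().lower() in QUESTION_HEADERS)
--         or (has_value[col_idx] and not has_other[col_idx])
--     ]
--
--     if not answer_columns:
--         raise SystemExit("Error: could not find any answer columns with values 'Method A'/'Method B'")
--
--     return answer_columns
-- ===== Notes on version B (the rewrite author's own statement) =====
-- stated objective: alternative
-- what changed: B drops A's per-column set construction and subset test entirely: one row-major pass fills two boolean flags per column ('saw a non-empty value', 'saw a value other than the two choices'), and a second pass classifies each column as has_value and not has_other; the per-column sets and the subset-of-{method a, method b} test disappear.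
import Mathlib
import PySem

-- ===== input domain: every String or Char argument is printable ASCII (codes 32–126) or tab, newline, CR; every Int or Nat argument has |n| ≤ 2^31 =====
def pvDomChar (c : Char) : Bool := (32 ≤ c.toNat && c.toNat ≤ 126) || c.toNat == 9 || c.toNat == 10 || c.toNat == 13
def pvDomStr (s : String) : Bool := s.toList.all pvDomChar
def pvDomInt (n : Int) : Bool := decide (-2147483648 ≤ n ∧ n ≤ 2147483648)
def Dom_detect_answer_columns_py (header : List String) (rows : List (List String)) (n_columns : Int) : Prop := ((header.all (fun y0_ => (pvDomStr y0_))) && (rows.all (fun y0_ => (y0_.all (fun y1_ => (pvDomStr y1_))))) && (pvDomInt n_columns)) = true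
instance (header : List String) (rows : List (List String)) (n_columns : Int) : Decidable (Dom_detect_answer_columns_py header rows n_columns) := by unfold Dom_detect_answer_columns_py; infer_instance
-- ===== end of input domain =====

-- B replaces A's per-column set building + subset test by two boolean flags per column,
-- filled in one row-major pass and read in a second classification pass; equal return values proved on Pre_.

def pvQ1 : String := "which set of poses appears more anatomically plausible and natural for the given human or animal mesh?"
def pvQ2 : String := "which set of poses is more diverse, with a larger range of different poses? ignore completely unrecognizable poses."
def pvCHOICE_A : String := "method a"
def pvCHOICE_B : String := "method b"

-- normalize a cell: value.strip().lower()
def pvNorm (s : String) : String := PySem.Str.lower (PySem.Str.strip s)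

-- ===== PORT A =====
def detect_answer_columns_py (header : List String) (rows : List (List String)) (n_columns : Int) : List Int :=
  let question_headers : PySem.Set String := PySem.Set.ofList [pvQ1, pvQ2]
  (PySem.List.pyRange 0 n_columns 1).foldl (fun answer_columns col_idx =>
    let header_value : String :=
      if col_idx < (header.length : Int) then pvNorm (PySem.List.pyGetD header col_idx "") else ""
    let values : PySem.Set String := rows.foldl (fun values row =>
      if (row.length : Int) ≤ col_idx then values
      else
        let value := pvNorm (PySem.List.pyGetD row col_idx "")
        if value ≠ "" then PySem.Set.add values value else values) PySem.Set.empty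
    let is_answer_by_header := question_headers.contains header_value
    let is_answer_by_values := !values.isEmpty && PySem.Set.issubset values (PySem.Set.ofList [pvCHOICE_A, pvCHOICE_B])
    if is_answer_by_header || is_answer_by_values then answer_columns ++ [col_idx] else answer_columns) []

-- ===== PORT B =====
-- one enumerated cell of row[:n_columns]: set the two flags of its column
def pvMark (st : List Bool × List Bool) (q : Int × String) : List Bool × List Bool :=
  if pvNorm q.2 ≠ "" then
    (st.1.modify q.1.toNat (fun _ => true),
     if pvNorm q.2 ≠ pvCHOICE_A ∧ pvNorm q.2 ≠ pvCHOICE_B then st.2.modify q.1.toNat (fun _ => true) else st.2)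
  else st

def detect_answer_columns_py_alt (header : List String) (rows : List (List String)) (n_columns : Int) : List Int :=
  -- pass 1 (row-major): has_value / has_other flags per column
  let flags : List Bool × List Bool :=
    rows.foldl (fun st row =>
        (PySem.List.enumerate (PySem.List.slice row none (some n_columns))).foldl pvMark st)
      (List.replicate n_columns.toNat false, List.replicate n_columns.toNat false)
  -- pass 2: classify each column from its flags
  (PySem.List.pyRange 0 n_columns 1).foldl (fun acc col_idx =>
    let byH := decide (col_idx < (header.length : Int)) &&
      (PySem.Set.ofList [pvQ1, pvQ2]).contains (pvNorm (PySem.List.pyGetD header col_idx ""))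
    let byV := flags.1.getD col_idx.toNat false && !flags.2.getD col_idx.toNat false
    if byH || byV then acc ++ [col_idx] else acc) []

-- ===== PRECONDITION & SPEC =====
-- per-column distinct normalized non-empty values (used only to state Pre_, independent of the ports)
def pvColVals (rows : List (List String)) (c : Nat) : PySem.Set String :=
  rows.foldl (fun s row =>
    match row[c]? with
    | none => s
    | some v => let w := pvNorm v; if w ≠ "" then PySem.Set.add s w else s) []

-- Pre_ excludes exactly the inputs on which A (and B alike) raises SystemExit: those where no
-- column index below n_columns matches a question header or has non-empty values ⊆ {CHOICE_A, CHOICE_B}.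
-- (columns at or beyond every row's and the header's length can never match, so the
-- scan may stop at that bound — this keeps Pre_ decidable fast for a huge n_columns)
def Pre_detect_answer_columns_py (header : List String) (rows : List (List String)) (n_columns : Int) : Prop :=
  ((List.range (min n_columns.toNat
      (max header.length (rows.foldl (fun m r => max m r.length) 0)))).any (fun c =>
    ((pvNorm (header.getD c "") == pvQ1) || (pvNorm (header.getD c "") == pvQ2)) ||
    (!(pvColVals rows c).isEmpty && PySem.Set.issubset (pvColVals rows c) [pvCHOICE_A, pvCHOICE_B]))) = true
instance (header : List String) (rows : List (List String)) (n_columns : Int) : Decidable (Pre_detect_answer_columns_py header rows n_columns) := by unfold Pre_detect_answer_columns_py; infer_instance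

def pvWitness_detect_answer_columns_py : List String × List (List String) × Int :=
  (["id", "q"], [["1", " Method A "], ["2", "method b"]], 2)

def Spec_detect_answer_columns_py (header : List String) (rows : List (List String)) (n_columns : Int) (out : List Int) : Prop := out = detect_answer_columns_py_alt header rows n_columns
instance (header : List String) (rows : List (List String)) (n_columns : Int) (out : List Int) : Decidable (Spec_detect_answer_columns_py header rows n_columns out) := by unfold Spec_detect_answer_columns_py; infer_instance

-- ===== CLAIM (what is proved, stated in full; the proofs are below) =====
def Claim_equal_detect_answer_columns_py : Prop := ∀ (header : List String) (rows : List (List String)) (n_columns : Int), Dom_detect_answer_columns_py header rows n_columns → Pre_detect_answer_columns_py header rows n_columns → Spec_detect_answer_columns_py header rows n_columns (detect_answer_columns_py header rows n_columns)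

-- ===== LEMMAS AND PROOFS =====

def pvAB : PySem.Set String := PySem.Set.ofList [pvCHOICE_A, pvCHOICE_B]

-- effect of one cell value on the two flags of its own column
def pvVal (x : String) (b : Bool) : Bool := if pvNorm x ≠ "" then true else b
def pvOth (x : String) (b : Bool) : Bool :=
  if pvNorm x ≠ "" ∧ pvNorm x ≠ pvCHOICE_A ∧ pvNorm x ≠ pvCHOICE_B then true else b

-- per-column boolean folds over the rows (reference forms of pass 1, read at column k)
def pvValStep (k : Nat) (b : Bool) (row : List String) : Bool :=
  if k < row.length then pvVal (row.getD k "") b else b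
def pvOthStep (k : Nat) (b : Bool) (row : List String) : Bool :=
  if k < row.length then pvOth (row.getD k "") b else b

-- A's per-row accumulation at one fixed column c
def pvStepA (c : Int) (vs : PySem.Set String) (row : List String) : PySem.Set String :=
  if (row.length : Int) ≤ c then vs
  else
    let value := pvNorm (PySem.List.pyGetD row c "")
    if value ≠ "" then PySem.Set.add vs value else vs

theorem pvSet_add_isEmpty {s : PySem.Set String} {x : String} :
    (PySem.Set.add s x).isEmpty = false := by
  rw [PySem.Set.add_eq_ite]
  split_ifs with h
  · obtain ⟨a, t, rfl⟩ := List.exists_cons_of_ne_nil (List.ne_nil_of_mem h)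
    rfl
  · simp

theorem pvSet_issubset_add {s : PySem.Set String} {x : String} {t : List String} :
    PySem.Set.issubset (PySem.Set.add s x) t = (PySem.Set.issubset s t && t.contains x) := by
  rw [Bool.eq_iff_iff]
  simp only [PySem.Set.issubset_iff, Bool.and_eq_true, PySem.Set.issubset_iff,
    List.contains_iff_mem]
  constructor
  · intro h
    exact ⟨fun y hy => h y ((PySem.Set.mem_add _ _ _).mpr (Or.inl hy)),
           h x ((PySem.Set.mem_add _ _ _).mpr (Or.inr rfl))⟩
  · rintro ⟨h1, h2⟩ y hy
    rcases (PySem.Set.mem_add _ _ _).mp hy with hy | rfl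
    · exact h1 y hy
    · exact h2

theorem pvSet_issubset_empty {t : List String} :
    PySem.Set.issubset (PySem.Set.empty : PySem.Set String) t = true := by
  rw [Bool.eq_iff_iff]
  simp [PySem.Set.issubset_iff, PySem.Set.empty]

theorem pvMark_length (st : List Bool × List Bool) (q : Int × String) :
    (pvMark st q).1.length = st.1.length ∧ (pvMark st q).2.length = st.2.length := by
  unfold pvMark
  split_ifs <;> simp [List.length_modify]

theorem pvMarkFold_length (xs : List String) : ∀ (s : Int) (st : List Bool × List Bool),
    ((PySem.List.enumerate xs s).foldl pvMark st).1.length = st.1.length ∧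
    ((PySem.List.enumerate xs s).foldl pvMark st).2.length = st.2.length := by
  induction xs with
  | nil => intro s st; simp [PySem.List.enumerate]
  | cons x xs ih =>
    intro s st
    rw [PySem.List.enumerate_cons, List.foldl_cons]
    rcases ih (s + 1) (pvMark st (s, x)) with ⟨h1, h2⟩
    rcases pvMark_length st (s, x) with ⟨g1, g2⟩
    exact ⟨h1.trans g1, h2.trans g2⟩

theorem pvMark_getD (st : List Bool × List Bool) (s k : Nat)
    (hk1 : k < st.1.length) (hk2 : k < st.2.length) (x : String) :
    (pvMark st ((s : Int), x)).1.getD k false =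
      (if s = k then pvVal x (st.1.getD k false) else st.1.getD k false) ∧
    (pvMark st ((s : Int), x)).2.getD k false =
      (if s = k then pvOth x (st.2.getD k false) else st.2.getD k false) := by
  unfold pvMark pvVal pvOth
  by_cases hw : pvNorm x ≠ ""
  · rw [if_pos hw]
    dsimp only
    simp only [Int.toNat_natCast]
    constructor
    · have hlm : k < (st.1.modify s (fun _ => true)).length := by
        rw [List.length_modify]; exact hk1
      rw [List.getD_eq_getElem _ _ hlm, List.getElem_modify, List.getD_eq_getElem _ _ hk1]
      by_cases hsk : s = k
      · simp [hsk, hw]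
      · simp [hsk]
    · by_cases hb : pvNorm x ≠ pvCHOICE_A ∧ pvNorm x ≠ pvCHOICE_B
      · rw [if_pos hb]
        have hlm : k < (st.2.modify s (fun _ => true)).length := by
          rw [List.length_modify]; exact hk2
        rw [List.getD_eq_getElem _ _ hlm, List.getElem_modify, List.getD_eq_getElem _ _ hk2]
        by_cases hsk : s = k
        · simp [hsk, hw, hb.1, hb.2]
        · simp [hsk]
      · rw [if_neg hb]
        by_cases hsk : s = k
        · have hno : ¬ (pvNorm x ≠ "" ∧ pvNorm x ≠ pvCHOICE_A ∧ pvNorm x ≠ pvCHOICE_B) := by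
            intro h; exact hb ⟨h.2.1, h.2.2⟩
          simp [hsk, hno]
        · simp [hsk]
  · rw [if_neg hw]
    push_neg at hw
    constructor
    · by_cases hsk : s = k
      · simp [hsk, hw]
      · simp [hsk]
    · by_cases hsk : s = k
      · have hno : ¬ (pvNorm x ≠ "" ∧ pvNorm x ≠ pvCHOICE_A ∧ pvNorm x ≠ pvCHOICE_B) := by
          intro h; exact h.1 hw
        simp [hsk, hno]
      · simp [hsk]

theorem pvMarkFold_getD (xs : List String) : ∀ (s : Nat) (st : List Bool × List Bool) (k : Nat),
    k < st.1.length → k < st.2.length →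
    ((PySem.List.enumerate xs (s : Int)).foldl pvMark st).1.getD k false =
      (if s ≤ k ∧ k - s < xs.length then pvVal (xs.getD (k - s) "") (st.1.getD k false)
       else st.1.getD k false) ∧
    ((PySem.List.enumerate xs (s : Int)).foldl pvMark st).2.getD k false =
      (if s ≤ k ∧ k - s < xs.length then pvOth (xs.getD (k - s) "") (st.2.getD k false)
       else st.2.getD k false) := by
  induction xs with
  | nil => intro s st k hk1 hk2; simp [PySem.List.enumerate]
  | cons x xs ih =>
    intro s st k hk1 hk2
    rw [PySem.List.enumerate_cons]
    have hs1 : ((s : Int) + 1) = ((s + 1 : Nat) : Int) := by push_cast; ring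
    rcases pvMark_length st ((s : Int), x) with ⟨g1, g2⟩
    have hk1' : k < (pvMark st ((s : Int), x)).1.length := by rw [g1]; exact hk1
    have hk2' : k < (pvMark st ((s : Int), x)).2.length := by rw [g2]; exact hk2
    rw [List.foldl_cons, hs1]
    rcases ih (s + 1) (pvMark st ((s : Int), x)) k hk1' hk2' with ⟨ih1, ih2⟩
    rcases pvMark_getD st s k hk1 hk2 x with ⟨m1, m2⟩
    rw [ih1, ih2, m1, m2]
    clear ih1 ih2 m1 m2
    by_cases hsk : s = k
    · subst hsk
      have h1 : ¬ (s + 1 ≤ s ∧ s - (s + 1) < xs.length) := by rintro ⟨h, _⟩; omega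
      have h2 : s ≤ s ∧ s - s < (x :: xs).length := ⟨le_refl _, by simp⟩
      rw [if_neg h1, if_neg h1, if_pos rfl, if_pos rfl, if_pos h2, if_pos h2,
        Nat.sub_self, List.getD_cons_zero]
      exact ⟨rfl, rfl⟩
    · rw [if_neg hsk, if_neg hsk]
      by_cases hc : s + 1 ≤ k ∧ k - (s + 1) < xs.length
      · have hc2 : s ≤ k ∧ k - s < (x :: xs).length :=
          ⟨by omega, by simp only [List.length_cons]; omega⟩
        have hks : k - s = (k - (s + 1)) + 1 := by omega
        rw [if_pos hc, if_pos hc, if_pos hc2, if_pos hc2, hks, List.getD_cons_succ]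
        exact ⟨rfl, rfl⟩
      · have hc2 : ¬ (s ≤ k ∧ k - s < (x :: xs).length) := by
          rintro ⟨h1, h2⟩
          apply hc
          refine ⟨by omega, ?_⟩
          simp only [List.length_cons] at h2; omega
        rw [if_neg hc, if_neg hc, if_neg hc2, if_neg hc2]
        exact ⟨rfl, rfl⟩

-- pass 1 over all rows, read at one column k (slice row[:N] with N = n.toNat)
set_option maxHeartbeats 1000000 in
theorem pvFlags_getD (N : Nat) (rows : List (List String)) :
    ∀ (st : List Bool × List Bool) (k : Nat), k < st.1.length → k < st.2.length → k < N →
    (rows.foldl (fun st row =>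
        (PySem.List.enumerate (PySem.List.slice row none (some (N : Int)))).foldl pvMark st)
      st).1.getD k false = rows.foldl (pvValStep k) (st.1.getD k false) ∧
    (rows.foldl (fun st row =>
        (PySem.List.enumerate (PySem.List.slice row none (some (N : Int)))).foldl pvMark st)
      st).2.getD k false = rows.foldl (pvOthStep k) (st.2.getD k false) := by
  induction rows with
  | nil => intro st k hk1 hk2 hkN; simp
  | cons row rs ih =>
    intro st k hk1 hk2 hkN
    simp only [List.foldl_cons]
    obtain ⟨l1, l2⟩ := pvMarkFold_length (PySem.List.slice row none (some (N : Int))) 0 st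
    have hk1' : k < ((PySem.List.enumerate (PySem.List.slice row none (some (N : Int)))).foldl pvMark st).1.length := by
      rw [l1]; exact hk1
    have hk2' : k < ((PySem.List.enumerate (PySem.List.slice row none (some (N : Int)))).foldl pvMark st).2.length := by
      rw [l2]; exact hk2
    obtain ⟨i1, i2⟩ := ih _ k hk1' hk2' hkN
    rw [i1, i2]
    have hslice : PySem.List.slice row none (some (N : Int)) = row.take N :=
      PySem.List.slice_to_natCast row N
    obtain ⟨f1, f2⟩ := pvMarkFold_getD (row.take N) 0 st k hk1 hk2
    have hlen : (row.take N).length = min N row.length := List.length_take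
    rw [hslice, show PySem.List.enumerate (row.take N) = PySem.List.enumerate (row.take N) ((0 : Nat) : Int) from rfl,
      f1, f2]
    constructor
    · unfold pvValStep
      by_cases h : k < row.length
      · have hc : 0 ≤ k ∧ k - 0 < (row.take N).length := ⟨Nat.zero_le _, by omega⟩
        rw [if_pos hc, if_pos h, Nat.sub_zero]
        congr 2
        rw [List.getD_eq_getElem _ _ (by omega), List.getElem_take, List.getD_eq_getElem _ _ h]
      · have hc : ¬ (0 ≤ k ∧ k - 0 < (row.take N).length) := by rintro ⟨_, h2⟩; omega
        rw [if_neg hc, if_neg h]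
    · unfold pvOthStep
      by_cases h : k < row.length
      · have hc : 0 ≤ k ∧ k - 0 < (row.take N).length := ⟨Nat.zero_le _, by omega⟩
        rw [if_pos hc, if_pos h, Nat.sub_zero]
        congr 2
        rw [List.getD_eq_getElem _ _ (by omega), List.getElem_take, List.getD_eq_getElem _ _ h]
      · have hc : ¬ (0 ≤ k ∧ k - 0 < (row.take N).length) := by rintro ⟨_, h2⟩; omega
        rw [if_neg hc, if_neg h]

-- joint invariant: the two boolean folds compute emptiness / subset failure of A's set fold
set_option maxHeartbeats 1000000 in
theorem pvJoint (k : Nat) (rows : List (List String)) :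
    ∀ (vs : PySem.Set String) (hv ho : Bool),
    hv = !vs.isEmpty → ho = !(PySem.Set.issubset vs pvAB) →
    rows.foldl (pvValStep k) hv = !(rows.foldl (pvStepA (k : Int)) vs).isEmpty ∧
    rows.foldl (pvOthStep k) ho = !(PySem.Set.issubset (rows.foldl (pvStepA (k : Int)) vs) pvAB) := by
  induction rows with
  | nil => intro vs hv ho h1 h2; simp [h1, h2]
  | cons row rs ih =>
    intro vs hv ho h1 h2
    simp only [List.foldl_cons]
    apply ih
    · -- has_value invariant after one row
      unfold pvValStep pvStepA pvVal
      by_cases h : k < row.length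
      · have h' : ¬ ((row.length : Int) ≤ (k : Int)) := by exact_mod_cast not_le.mpr h
        have hget : PySem.List.pyGetD row (k : Int) "" = row.getD k "" :=
          PySem.List.pyGetD_natCast row k ""
        rw [if_pos h, if_neg h']
        simp only [hget]
        by_cases hw : pvNorm (row.getD k "") ≠ ""
        · rw [if_pos hw, if_pos hw, pvSet_add_isEmpty]; rfl
        · rw [if_neg hw, if_neg hw, h1]
      · have h' : (row.length : Int) ≤ (k : Int) := by exact_mod_cast not_lt.mp h
        rw [if_neg h, if_pos h', h1]
    · -- has_other invariant after one row
      unfold pvOthStep pvStepA pvOth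
      by_cases h : k < row.length
      · have h' : ¬ ((row.length : Int) ≤ (k : Int)) := by exact_mod_cast not_le.mpr h
        have hget : PySem.List.pyGetD row (k : Int) "" = row.getD k "" :=
          PySem.List.pyGetD_natCast row k ""
        rw [if_neg h', if_pos h]
        simp only [hget]
        set w := pvNorm (row.getD k "") with hwdef
        by_cases hw : w ≠ ""
        · rw [if_pos hw, pvSet_issubset_add]
          by_cases hb : w ≠ pvCHOICE_A ∧ w ≠ pvCHOICE_B
          · rw [if_pos ⟨hw, hb.1, hb.2⟩]
            have hcont : List.contains pvAB w = false := by
              rw [Bool.eq_false_iff, Ne, List.contains_iff_mem]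
              intro hm
              simp only [pvAB, PySem.Set.mem_ofList, List.mem_cons, List.not_mem_nil,
                or_false] at hm
              rcases hm with hm | hm
              · exact hb.1 hm
              · exact hb.2 hm
            rw [hcont, Bool.and_false, Bool.not_false]
          · have hnb : ¬ (w ≠ "" ∧ w ≠ pvCHOICE_A ∧ w ≠ pvCHOICE_B) := by
              intro hx; exact hb ⟨hx.2.1, hx.2.2⟩
            rw [if_neg hnb, h2]
            push_neg at hb
            have hcont : List.contains pvAB w = true := by
              rw [List.contains_iff_mem]
              simp only [pvAB, PySem.Set.mem_ofList, List.mem_cons, List.not_mem_nil, or_false]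
              by_cases ha : w = pvCHOICE_A
              · exact Or.inl ha
              · exact Or.inr (hb ha)
            rw [hcont, Bool.and_true]
        · push_neg at hw
          have hnb : ¬ (w ≠ "" ∧ w ≠ pvCHOICE_A ∧ w ≠ pvCHOICE_B) := by
            intro hx; exact hx.1 hw
          rw [if_neg hnb, if_neg (show ¬ (w ≠ "") from fun hx => hx hw), h2]
      · have h' : (row.length : Int) ≤ (k : Int) := by exact_mod_cast not_lt.mp h
        rw [if_neg h, if_pos h', h2]

theorem pvQ_ne_empty : (PySem.Set.ofList [pvQ1, pvQ2]).contains "" = false := by decide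

set_option maxHeartbeats 1000000 in
theorem detect_answer_columns_py_spec : Claim_equal_detect_answer_columns_py := by
  intro header rows n_columns _ _
  unfold Spec_detect_answer_columns_py detect_answer_columns_py detect_answer_columns_py_alt
  apply PySem.List.foldl_congr_mem
  intro acc c hc
  obtain ⟨hc0, hcn⟩ := (PySem.List.mem_pyRange_one).mp hc
  have hkn : (c.toNat : Int) = c := by omega
  have hNpos : c.toNat < n_columns.toNat := by omega
  -- header condition
  have hheader : (PySem.Set.ofList [pvQ1, pvQ2]).contains
      (if c < (header.length : Int) then pvNorm (PySem.List.pyGetD header c "") else "") =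
      (decide (c < (header.length : Int)) &&
        (PySem.Set.ofList [pvQ1, pvQ2]).contains (pvNorm (PySem.List.pyGetD header c ""))) := by
    by_cases h : c < (header.length : Int)
    · simp [h]
    · rw [if_neg h, pvQ_ne_empty]
      simp [h]
  -- values: A's per-column set test equals B's two flags at this column
  have hNslice : ((n_columns.toNat : Nat) : Int) = n_columns := by omega
  have hflags := pvFlags_getD n_columns.toNat rows
    (List.replicate n_columns.toNat false, List.replicate n_columns.toNat false) c.toNat
    (by simpa using hNpos) (by simpa using hNpos) hNpos
  rw [hNslice] at hflags
  obtain ⟨hf1, hf2⟩ := hflags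
  have hinit1 : (List.replicate n_columns.toNat false).getD c.toNat false = false := by
    simp [List.getD, hNpos]
  have hjoint := pvJoint c.toNat rows PySem.Set.empty false false
    (by simp [PySem.Set.empty]) (by rw [pvSet_issubset_empty]; rfl)
  rw [hkn] at hjoint
  obtain ⟨hj1, hj2⟩ := hjoint
  have hvals : (!(rows.foldl (fun values row =>
      if (row.length : Int) ≤ c then values
      else
        let value := pvNorm (PySem.List.pyGetD row c "")
        if value ≠ "" then PySem.Set.add values value else values) PySem.Set.empty).isEmpty &&
      PySem.Set.issubset (rows.foldl (fun values row =>
      if (row.length : Int) ≤ c then values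
      else
        let value := pvNorm (PySem.List.pyGetD row c "")
        if value ≠ "" then PySem.Set.add values value else values) PySem.Set.empty)
        (PySem.Set.ofList [pvCHOICE_A, pvCHOICE_B])) =
      ((rows.foldl (fun st row =>
          (PySem.List.enumerate (PySem.List.slice row none (some n_columns))).foldl pvMark st)
        (List.replicate n_columns.toNat false, List.replicate n_columns.toNat false)).1.getD c.toNat false &&
       !(rows.foldl (fun st row =>
          (PySem.List.enumerate (PySem.List.slice row none (some n_columns))).foldl pvMark st)
        (List.replicate n_columns.toNat false, List.replicate n_columns.toNat false)).2.getD c.toNat false) := by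
    have hA : rows.foldl (fun values row =>
        if (row.length : Int) ≤ c then values
        else
          let value := pvNorm (PySem.List.pyGetD row c "")
          if value ≠ "" then PySem.Set.add values value else values) PySem.Set.empty =
        rows.foldl (pvStepA c) PySem.Set.empty := rfl
    rw [hA, show (PySem.Set.ofList [pvCHOICE_A, pvCHOICE_B]) = pvAB from rfl,
      hf1, hf2, hinit1, hj1, hj2, Bool.not_not]
  simp only [hheader, hvals]
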